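-- pv_equiv track=rewrite | github.com/isectec/isectech-security | cloud-security-posture/drift/drift_detection_engine.py | _assess_compliance_impact
-- ===== SOURCE A (Python) =====
-- from typing import Dict, List, Optional, Any, Set, Union, Tuple
--
-- def _assess_compliance_impact(field_path: str, changes: Dict[str, Any], frameworks: List[str]) -> List[str]:
--     """Assess compliance framework impact"""
--
--     impact = []
--
--     for framework in frameworks:
--         if framework.upper() == 'CIS':
--             if 'encryption' in field_path.lower():
--                 impact.append("CIS: May violate encryption requirements")
--             if 'public_access' in field_path.lower():
--                 impact.append("CIS: May violate public access restrictions")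
--             if 'logging' in field_path.lower():
--                 impact.append("CIS: May violate logging requirements")
--
--         elif framework.upper() == 'SOC2':
--             if 'security' in field_path.lower() or 'access' in field_path.lower():
--                 impact.append("SOC2: May impact access control requirements")
--             if 'encryption' in field_path.lower():
--                 impact.append("SOC2: May violate data protection requirements")
--
--         elif framework.upper() == 'PCI-DSS':
--             if 'encryption' in field_path.lower():
--                 impact.append("PCI-DSS: May violate data encryption requirements")
--             if 'network' in field_path.lower() or 'firewall' in field_path.lower():
--                 impact.append("PCI-DSS: May impact network security requirements")
--
--     return impact
-- ===== SOURCE B (Python) =====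
-- _KEYWORDS = ('encryption', 'public_access', 'logging', 'security',
--              'access', 'network', 'firewall')
--
-- _RULES = {
--     'CIS': [
--         (('encryption',), "CIS: May violate encryption requirements"),
--         (('public_access',), "CIS: May violate public access restrictions"),
--         (('logging',), "CIS: May violate logging requirements"),
--     ],
--     'SOC2': [
--         (('security', 'access'), "SOC2: May impact access control requirements"),
--         (('encryption',), "SOC2: May violate data protection requirements"),
--     ],
--     'PCI-DSS': [
--         (('encryption',), "PCI-DSS: May violate data encryption requirements"),
--         (('network', 'firewall'), "PCI-DSS: May impact network security requirements"),
--     ],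
-- }
--
-- def _assess_compliance_impact(field_path, changes, frameworks):
--     # Stage 1: scan field_path once, collecting the set of matched keywords.
--     low = field_path.lower()
--     hits = {kw for kw in _KEYWORDS if kw in low}
--     # Stage 2: precompute each framework's triggered message list once.
--     triggered = {fw: [msg for kws, msg in rules if any(k in hits for k in kws)]
--                  for fw, rules in _RULES.items()}
--     # Stage 3: the frameworks loop is pure lookup + concatenation.
--     out = []
--     for fw in frameworks:
--         out += triggered.get(fw.upper(), [])
--     return out
-- ===== Notes on version B (the rewrite author's own statement) =====
-- stated objective: alternative
-- what changed: Instead of re-running substring searches inside the frameworks loop (A's if/elif ladder), B stages the work: it scans field_path once to build the set of matched keywords, precomputes each framework's triggered message list once from that set, and the frameworks loop becomes a pure dict lookup plus concatenation; it trades a small fixed precomputation for a framework loop that does no string searching at all.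
import Mathlib
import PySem

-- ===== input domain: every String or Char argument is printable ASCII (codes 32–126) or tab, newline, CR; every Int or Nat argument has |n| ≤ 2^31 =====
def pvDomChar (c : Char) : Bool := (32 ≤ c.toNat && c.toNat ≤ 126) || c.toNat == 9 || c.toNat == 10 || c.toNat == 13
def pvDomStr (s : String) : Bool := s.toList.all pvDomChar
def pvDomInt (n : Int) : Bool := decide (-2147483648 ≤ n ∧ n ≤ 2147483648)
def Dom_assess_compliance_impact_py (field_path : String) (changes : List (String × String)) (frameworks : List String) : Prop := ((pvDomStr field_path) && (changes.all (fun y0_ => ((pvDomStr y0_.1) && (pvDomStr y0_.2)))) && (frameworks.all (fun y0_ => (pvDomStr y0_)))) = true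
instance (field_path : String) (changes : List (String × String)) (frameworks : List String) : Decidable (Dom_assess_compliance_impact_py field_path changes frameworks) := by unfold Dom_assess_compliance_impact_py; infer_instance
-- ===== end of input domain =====

-- B scans field_path once into a set of matched keywords, precomputes each framework's
-- triggered message list once, and makes the frameworks loop pure lookup + concatenation.


-- ===== PORT A =====
def assess_compliance_impact_py (field_path : String) (changes : List (String × String)) (frameworks : List String) : List String :=
  frameworks.foldl (fun impact framework =>
    if PySem.Str.upper framework == "CIS" then
      let impact := if PySem.Str.isIn "encryption" (PySem.Str.lower field_path) then
        impact ++ ["CIS: May violate encryption requirements"] else impact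
      let impact := if PySem.Str.isIn "public_access" (PySem.Str.lower field_path) then
        impact ++ ["CIS: May violate public access restrictions"] else impact
      let impact := if PySem.Str.isIn "logging" (PySem.Str.lower field_path) then
        impact ++ ["CIS: May violate logging requirements"] else impact
      impact
    else if PySem.Str.upper framework == "SOC2" then
      let impact := if PySem.Str.isIn "security" (PySem.Str.lower field_path)
          || PySem.Str.isIn "access" (PySem.Str.lower field_path) then
        impact ++ ["SOC2: May impact access control requirements"] else impact
      let impact := if PySem.Str.isIn "encryption" (PySem.Str.lower field_path) then
        impact ++ ["SOC2: May violate data protection requirements"] else impact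
      impact
    else if PySem.Str.upper framework == "PCI-DSS" then
      let impact := if PySem.Str.isIn "encryption" (PySem.Str.lower field_path) then
        impact ++ ["PCI-DSS: May violate data encryption requirements"] else impact
      let impact := if PySem.Str.isIn "network" (PySem.Str.lower field_path)
          || PySem.Str.isIn "firewall" (PySem.Str.lower field_path) then
        impact ++ ["PCI-DSS: May impact network security requirements"] else impact
      impact
    else impact) []

-- ===== PORT B =====
def pvKeywords : List String :=
  ["encryption", "public_access", "logging", "security", "access", "network", "firewall"]

-- _RULES as a dict literal (association list in insertion order, keys distinct)
def pvRules : List (String × List (List String × String)) :=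
  [("CIS", [
      (["encryption"], "CIS: May violate encryption requirements"),
      (["public_access"], "CIS: May violate public access restrictions"),
      (["logging"], "CIS: May violate logging requirements")]),
   ("SOC2", [
      (["security", "access"], "SOC2: May impact access control requirements"),
      (["encryption"], "SOC2: May violate data protection requirements")]),
   ("PCI-DSS", [
      (["encryption"], "PCI-DSS: May violate data encryption requirements"),
      (["network", "firewall"], "PCI-DSS: May impact network security requirements")])]

def assess_compliance_impact_py_alt (field_path : String) (changes : List (String × String)) (frameworks : List String) : List String :=
  -- Stage 1: scan field_path once, collecting the set of matched keywords.
  let low := PySem.Str.lower field_path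
  let hits : PySem.Set String := PySem.Set.ofList (pvKeywords.filter (fun kw => PySem.Str.isIn kw low))
  -- Stage 2: precompute each framework's triggered message list once.
  let triggered : PySem.Dict String (List String) :=
    PySem.Dict.ofList (pvRules.map (fun fr =>
      (fr.1, fr.2.filterMap (fun r =>
        if r.1.any (fun k => PySem.Set.contains hits k) then some r.2 else none))))
  -- Stage 3: the frameworks loop is pure lookup + concatenation.
  frameworks.foldl (fun out fw => out ++ triggered.getD (PySem.Str.upper fw) []) []

-- ===== PRECONDITION & SPEC =====
def Spec_assess_compliance_impact_py (field_path : String) (changes : List (String × String)) (frameworks : List String) (out : List String) : Prop := out = assess_compliance_impact_py_alt field_path changes frameworks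
instance (field_path : String) (changes : List (String × String)) (frameworks : List String) (out : List String) : Decidable (Spec_assess_compliance_impact_py field_path changes frameworks out) := by unfold Spec_assess_compliance_impact_py; infer_instance

-- ===== CLAIM =====
def Claim_equal_assess_compliance_impact_py : Prop := ∀ (field_path : String) (changes : List (String × String)) (frameworks : List String), Dom_assess_compliance_impact_py field_path changes frameworks → Spec_assess_compliance_impact_py field_path changes frameworks (assess_compliance_impact_py field_path changes frameworks)

-- ===== LEMMAS AND PROOFS =====

-- B's matched-keyword set
def pvHits (low : String) : PySem.Set String :=
  PySem.Set.ofList (pvKeywords.filter (fun kw => PySem.Str.isIn kw low))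

lemma mem_hits (low kw : String) (h : kw ∈ pvKeywords) :
    (kw ∈ pvHits low) ↔ PySem.Chars.isIn kw.toList low.toList = true := by
  unfold pvHits
  simp [PySem.Set.mem_ofList, List.mem_filter, h]

-- B's triggered dict
def pvTriggered (low : String) : PySem.Dict String (List String) :=
  PySem.Dict.ofList (pvRules.map (fun fr =>
    (fr.1, fr.2.filterMap (fun r =>
      if r.1.any (fun k => PySem.Set.contains (pvHits low) k) then some r.2 else none))))

lemma trig_cis (low : String) : (pvTriggered low).getD "CIS" [] =
    ((if PySem.Str.isIn "encryption" low then ["CIS: May violate encryption requirements"] else []) ++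
     (if PySem.Str.isIn "public_access" low then ["CIS: May violate public access restrictions"] else []) ++
     (if PySem.Str.isIn "logging" low then ["CIS: May violate logging requirements"] else [])) := by
  unfold pvTriggered pvRules
  simp [PySem.Dict.ofList, PySem.Dict.update, PySem.Dict.getD_insert, PySem.Dict.getD_empty, List.filterMap,
    mem_hits low "encryption" (by decide), mem_hits low "public_access" (by decide),
    mem_hits low "logging" (by decide)]
  split_ifs <;> simp_all [mem_hits low "encryption" (by decide), mem_hits low "public_access" (by decide), mem_hits low "logging" (by decide)]

lemma trig_soc2 (low : String) : (pvTriggered low).getD "SOC2" [] =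
    ((if PySem.Str.isIn "security" low || PySem.Str.isIn "access" low then ["SOC2: May impact access control requirements"] else []) ++
     (if PySem.Str.isIn "encryption" low then ["SOC2: May violate data protection requirements"] else [])) := by
  unfold pvTriggered pvRules
  simp [PySem.Dict.ofList, PySem.Dict.update, PySem.Dict.getD_insert, PySem.Dict.getD_empty, List.filterMap,
    mem_hits low "encryption" (by decide), mem_hits low "security" (by decide),
    mem_hits low "access" (by decide)]
  split_ifs <;> simp_all [mem_hits low "encryption" (by decide), mem_hits low "security" (by decide), mem_hits low "access" (by decide)]

lemma trig_pci (low : String) : (pvTriggered low).getD "PCI-DSS" [] =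
    ((if PySem.Str.isIn "encryption" low then ["PCI-DSS: May violate data encryption requirements"] else []) ++
     (if PySem.Str.isIn "network" low || PySem.Str.isIn "firewall" low then ["PCI-DSS: May impact network security requirements"] else [])) := by
  unfold pvTriggered pvRules
  simp [PySem.Dict.ofList, PySem.Dict.update, PySem.Dict.getD_insert, PySem.Dict.getD_empty, List.filterMap,
    mem_hits low "encryption" (by decide), mem_hits low "network" (by decide),
    mem_hits low "firewall" (by decide)]
  split_ifs <;> simp_all [mem_hits low "encryption" (by decide), mem_hits low "network" (by decide), mem_hits low "firewall" (by decide)]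

lemma trig_other (low k : String) (h1 : k ≠ "CIS") (h2 : k ≠ "SOC2") (h3 : k ≠ "PCI-DSS") :
    (pvTriggered low).getD k [] = [] := by
  unfold pvTriggered pvRules
  simp [PySem.Dict.ofList, PySem.Dict.update, PySem.Dict.getD_insert, PySem.Dict.getD_empty, List.filterMap, h1, h2, h3]

-- A's per-framework step appends exactly B's lookup
lemma step_eq (field_path fw : String) (impact : List String) :
    (if PySem.Str.upper fw == "CIS" then
      let i := if PySem.Str.isIn "encryption" (PySem.Str.lower field_path) then
        impact ++ ["CIS: May violate encryption requirements"] else impact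
      let i := if PySem.Str.isIn "public_access" (PySem.Str.lower field_path) then
        i ++ ["CIS: May violate public access restrictions"] else i
      let i := if PySem.Str.isIn "logging" (PySem.Str.lower field_path) then
        i ++ ["CIS: May violate logging requirements"] else i
      i
    else if PySem.Str.upper fw == "SOC2" then
      let i := if PySem.Str.isIn "security" (PySem.Str.lower field_path)
          || PySem.Str.isIn "access" (PySem.Str.lower field_path) then
        impact ++ ["SOC2: May impact access control requirements"] else impact
      let i := if PySem.Str.isIn "encryption" (PySem.Str.lower field_path) then
        i ++ ["SOC2: May violate data protection requirements"] else i
      i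
    else if PySem.Str.upper fw == "PCI-DSS" then
      let i := if PySem.Str.isIn "encryption" (PySem.Str.lower field_path) then
        impact ++ ["PCI-DSS: May violate data encryption requirements"] else impact
      let i := if PySem.Str.isIn "network" (PySem.Str.lower field_path)
          || PySem.Str.isIn "firewall" (PySem.Str.lower field_path) then
        i ++ ["PCI-DSS: May impact network security requirements"] else i
      i
    else impact) = impact ++ (pvTriggered (PySem.Str.lower field_path)).getD (PySem.Str.upper fw) [] := by
  by_cases h1 : PySem.Str.upper fw = "CIS"
  · rw [h1, trig_cis]
    simp only [beq_self_eq_true, if_true]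
    split_ifs <;> simp
  · by_cases h2 : PySem.Str.upper fw = "SOC2"
    · rw [h2, trig_soc2]
      simp only [beq_self_eq_true, beq_iff_eq, if_true]
      split_ifs <;> simp_all
    · by_cases h3 : PySem.Str.upper fw = "PCI-DSS"
      · rw [h3, trig_pci]
        simp only [beq_self_eq_true, beq_iff_eq, if_true]
        split_ifs <;> simp_all
      · rw [trig_other _ _ h1 h2 h3]
        simp [h1, h2, h3]

lemma fold_eq (field_path : String) (fws : List String) (acc : List String) :
    fws.foldl (fun impact framework =>
      if PySem.Str.upper framework == "CIS" then
        let impact := if PySem.Str.isIn "encryption" (PySem.Str.lower field_path) then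
          impact ++ ["CIS: May violate encryption requirements"] else impact
        let impact := if PySem.Str.isIn "public_access" (PySem.Str.lower field_path) then
          impact ++ ["CIS: May violate public access restrictions"] else impact
        let impact := if PySem.Str.isIn "logging" (PySem.Str.lower field_path) then
          impact ++ ["CIS: May violate logging requirements"] else impact
        impact
      else if PySem.Str.upper framework == "SOC2" then
        let impact := if PySem.Str.isIn "security" (PySem.Str.lower field_path)
            || PySem.Str.isIn "access" (PySem.Str.lower field_path) then
          impact ++ ["SOC2: May impact access control requirements"] else impact
        let impact := if PySem.Str.isIn "encryption" (PySem.Str.lower field_path) then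
          impact ++ ["SOC2: May violate data protection requirements"] else impact
        impact
      else if PySem.Str.upper framework == "PCI-DSS" then
        let impact := if PySem.Str.isIn "encryption" (PySem.Str.lower field_path) then
          impact ++ ["PCI-DSS: May violate data encryption requirements"] else impact
        let impact := if PySem.Str.isIn "network" (PySem.Str.lower field_path)
            || PySem.Str.isIn "firewall" (PySem.Str.lower field_path) then
          impact ++ ["PCI-DSS: May impact network security requirements"] else impact
        impact
      else impact) acc
    = fws.foldl (fun out fw => out ++ (pvTriggered (PySem.Str.lower field_path)).getD (PySem.Str.upper fw) []) acc := by
  induction fws generalizing acc with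
  | nil => rfl
  | cons fw rest ih =>
    simp only [List.foldl_cons]
    rw [step_eq, ih]

-- ===== VERDICT =====
theorem assess_compliance_impact_py_spec : Claim_equal_assess_compliance_impact_py := by
  intro field_path changes frameworks _
  unfold Spec_assess_compliance_impact_py assess_compliance_impact_py assess_compliance_impact_py_alt
  rw [fold_eq]
  rfl
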